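-- pv_equiv track=rewrite | github.com/GunsRuth/LitCoder-Python | Modules/M3L1/q1.py | maxSS
-- ===== SOURCE A (Python) =====
-- def maxSS(text, pattern):
--     leftTotal = rightTotal = normal = 0
--     for char in text:
--         if char == pattern[1]:
--             leftTotal += 1
--             normal += rightTotal
--         if char == pattern[0]:
--             rightTotal += 1
--     return normal+max(leftTotal, rightTotal)
-- ===== SOURCE B (Python) =====
-- def maxSS(text, pattern):
--     if not text:
--         return 0
--     p0, p1 = pattern[0], pattern[1]
--     pre = [0]
--     for ch in text:
--         pre.append(pre[-1] + (ch == p0))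
--     pairs = sum(c for ch, c in zip(text, pre) if ch == p1)
--     ones = sum(1 for ch in text if ch == p1)
--     return pairs + max(ones, pre[-1])
-- ===== Notes on version B (the rewrite author's own statement) =====
-- stated objective: alternative
-- what changed: Replaces A's single fused loop over three mutable counters by a prefix-count table of pattern[0] occurrences built first, then separate passes (a zip-scan for the pair count and a filtered count of pattern[1]) combined at the end.
import Mathlib
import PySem

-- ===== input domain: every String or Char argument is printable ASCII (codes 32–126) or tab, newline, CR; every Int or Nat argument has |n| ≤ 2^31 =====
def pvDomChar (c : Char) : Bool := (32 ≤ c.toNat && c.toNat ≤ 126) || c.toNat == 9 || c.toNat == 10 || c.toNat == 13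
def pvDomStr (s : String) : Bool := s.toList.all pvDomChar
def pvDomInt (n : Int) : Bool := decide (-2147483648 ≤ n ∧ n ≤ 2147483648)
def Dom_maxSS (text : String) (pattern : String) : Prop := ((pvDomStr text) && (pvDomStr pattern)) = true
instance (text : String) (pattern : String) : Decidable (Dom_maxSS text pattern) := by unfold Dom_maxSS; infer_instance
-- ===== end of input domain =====

-- B replaces A's single fused three-counter loop by a prefix-count table of pattern[0]
-- built first, then separate passes (zip-scan for pairs, a count of pattern[1]); alternative, same cost.


-- ===== PORT A =====
-- one pass; 'char == pattern[1]' ported as equality with the Option result of pyGet?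
-- (outside Pre_ Python raises IndexError there; such inputs are excluded by Pre_).
def maxSS (text : String) (pattern : String) : Int :=
  let st := text.toList.foldl (fun (s : Int × Int × Int) ch =>
    let s1 := if some ch = PySem.Str.pyGet? pattern 1 then (s.1 + 1, s.2.1, s.2.2 + s.2.1) else s
    if some ch = PySem.Str.pyGet? pattern 0 then (s1.1, s1.2.1 + 1, s1.2.2) else s1)
    ((0 : Int), (0 : Int), (0 : Int))
  st.2.2 + max st.1 st.2.1

-- ===== PORT B =====
-- follows Source B: guard empty text, build prefix table, zip-scan for pairs, count of p1.
-- pattern[0]/pattern[1] read via pyGet?; .getD is only reached outside Pre_ (where Python raises).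
def maxSS_alt (text : String) (pattern : String) : Int :=
  if text.toList = [] then 0
  else
    let p0 := (PySem.Str.pyGet? pattern 0).getD ' '
    let p1 := (PySem.Str.pyGet? pattern 1).getD ' '
    let pre := text.toList.foldl
      (fun (pre : List Int) ch => pre ++ [pre.getLastD 0 + (if ch = p0 then 1 else 0)]) [0]
    let pairs := (text.toList.zip pre).foldl
      (fun (s : Int) p => if p.1 = p1 then s + p.2 else s) 0
    let ones := text.toList.foldl (fun (s : Int) ch => if ch = p1 then s + 1 else s) 0
    pairs + max ones (pre.getLastD 0)

-- ===== PRECONDITION & SPEC =====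
-- Pre_ excludes exactly the inputs where Python A raises IndexError (nonempty text with
-- a pattern shorter than 2 chars); B raises there too.
def Pre_maxSS (text : String) (pattern : String) : Prop :=
  text.toList = [] ∨ 2 ≤ pattern.toList.length
instance (text : String) (pattern : String) : Decidable (Pre_maxSS text pattern) := by
  unfold Pre_maxSS; infer_instance
def pvWitness_maxSS : String × String := ("abab", "ab")

def Spec_maxSS (text : String) (pattern : String) (out : Int) : Prop := out = maxSS_alt text pattern
instance (text : String) (pattern : String) (out : Int) : Decidable (Spec_maxSS text pattern out) := by unfold Spec_maxSS; infer_instance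

-- ===== CLAIM (what is proved, stated in full; the proofs are below) =====
def Claim_equal_maxSS : Prop := ∀ (text : String) (pattern : String), Dom_maxSS text pattern → Pre_maxSS text pattern → Spec_maxSS text pattern (maxSS text pattern)

-- ===== LEMMAS AND PROOFS =====

/-- count of occurrences of `p`, as an Int. -/
def pvCnt (p : Char) : List Char → Int
  | [] => 0
  | c :: cs => (if c = p then 1 else 0) + pvCnt p cs

/-- pair count starting with `r` occurrences of `p0` already seen. -/
def pvPairs (p0 p1 : Char) (r : Int) : List Char → Int
  | [] => 0
  | c :: cs => (if c = p1 then r else 0) + pvPairs p0 p1 (r + if c = p0 then 1 else 0) cs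

/-- running prefix-count scan of `p0`, starting from `x` (tail of B's `pre` list). -/
def pvScan (p0 : Char) (x : Int) : List Char → List Int
  | [] => []
  | c :: cs => (x + if c = p0 then 1 else 0) :: pvScan p0 (x + if c = p0 then 1 else 0) cs

/-- A's loop body as a simultaneous update of the three counters. -/
def pvStepA (p0 p1 : Char) (s : Int × Int × Int) (ch : Char) : Int × Int × Int :=
  (s.1 + if ch = p1 then 1 else 0,
   s.2.1 + if ch = p0 then 1 else 0,
   s.2.2 + if ch = p1 then s.2.1 else 0)

lemma pvStepA_eq (p0 p1 : Char) : (fun (s : Int × Int × Int) ch =>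
      let s1 := if some ch = some p1 then (s.1 + 1, s.2.1, s.2.2 + s.2.1) else s
      if some ch = some p0 then (s1.1, s1.2.1 + 1, s1.2.2) else s1) = pvStepA p0 p1 := by
  funext s ch
  simp only [pvStepA, Option.some.injEq]
  by_cases h1 : ch = p1 <;> by_cases h0 : ch = p0
  · subst h1; subst h0; simp
  · subst h1; simp [h0]
  · subst h0; simp [h1]
  · simp [h0, h1]

lemma pvFoldA (p0 p1 : Char) : ∀ (cs : List Char) (l r n : Int),
    cs.foldl (pvStepA p0 p1) (l, r, n)
    = (l + pvCnt p1 cs, r + pvCnt p0 cs, n + pvPairs p0 p1 r cs) := by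
  intro cs
  induction cs with
  | nil => intro l r n; simp [pvCnt, pvPairs]
  | cons c cs ih =>
    intro l r n
    rw [List.foldl_cons,
      show pvStepA p0 p1 (l, r, n) c
        = (l + if c = p1 then 1 else 0, r + if c = p0 then 1 else 0,
           n + if c = p1 then r else 0) from rfl, ih]
    simp only [pvCnt, pvPairs, Prod.mk.injEq]
    refine ⟨by ring, by ring, by split_ifs <;> ring⟩

lemma pvFoldPre (p0 : Char) : ∀ (cs : List Char) (acc : List Int),
    cs.foldl (fun (pre : List Int) ch => pre ++ [pre.getLastD 0 + (if ch = p0 then 1 else 0)]) acc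
    = acc ++ pvScan p0 (acc.getLastD 0) cs := by
  intro cs
  induction cs with
  | nil => intro acc; simp [pvScan]
  | cons c cs ih =>
    intro acc
    simp only [List.foldl_cons, ih, pvScan]
    rw [List.getLastD_concat]
    simp

lemma pvScanLast (p0 : Char) : ∀ (cs : List Char) (x : Int),
    (x :: pvScan p0 x cs).getLastD 0 = x + pvCnt p0 cs := by
  intro cs
  induction cs with
  | nil => intro x; simp [pvScan, pvCnt]
  | cons c cs ih =>
    intro x
    have h := ih (x + if c = p0 then 1 else 0)
    simp only [pvScan, List.getLastD_cons] at h ⊢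
    rw [h]
    simp only [pvCnt]
    ring

lemma pvZipPairs (p0 p1 : Char) : ∀ (cs : List Char) (x s : Int),
    (cs.zip (x :: pvScan p0 x cs)).foldl (fun (s : Int) p => if p.1 = p1 then s + p.2 else s) s
    = s + pvPairs p0 p1 x cs := by
  intro cs
  induction cs with
  | nil => intro x s; simp [pvPairs]
  | cons c cs ih =>
    intro x s
    simp only [pvScan, List.zip_cons_cons, List.foldl_cons, pvPairs, ih]
    by_cases h : c = p1 <;> simp [h] <;> ring

lemma pvOnes (p1 : Char) : ∀ (cs : List Char) (s : Int),
    cs.foldl (fun (s : Int) ch => if ch = p1 then s + 1 else s) s = s + pvCnt p1 cs := by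
  intro cs
  induction cs with
  | nil => intro s; simp [pvCnt]
  | cons c cs ih =>
    intro s
    simp only [List.foldl_cons, pvCnt, ih]
    by_cases h : c = p1 <;> simp [h] <;> ring

-- ===== VERDICT (by name: the statement is the Claim_ definition above) =====
theorem maxSS_spec : Claim_equal_maxSS := by
  intro text pattern _ hpre
  unfold Spec_maxSS maxSS maxSS_alt
  by_cases hemp : text.toList = []
  · rw [if_pos hemp, hemp]
    simp
  · have hlen : 2 ≤ pattern.toList.length := by
      rcases hpre with h | h
      · exact absurd h hemp
      · exact h
    obtain ⟨a, b, t, hpat⟩ : ∃ a b t, pattern.toList = a :: b :: t := by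
      match hp : pattern.toList with
      | [] => rw [hp] at hlen; simp at hlen
      | [x] => rw [hp] at hlen; simp at hlen
      | x :: y :: t => exact ⟨x, y, t, rfl⟩
    have h0 : PySem.Str.pyGet? pattern 0 = some a := by simp [hpat]
    have h1 : PySem.Str.pyGet? pattern 1 = some b := by simp [hpat]
    rw [if_neg hemp]
    simp only [h0, h1, Option.getD_some]
    rw [pvStepA_eq a b, pvFoldA a b]
    rw [pvFoldPre a]
    simp only [List.singleton_append, List.getLastD_cons, List.getLastD_nil]
    rw [pvZipPairs a b, pvOnes b]
    have hlast : (pvScan a 0 text.toList).getLastD 0 = 0 + pvCnt a text.toList := by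
      have h := pvScanLast a text.toList 0
      rw [List.getLastD_cons] at h
      exact h
    rw [hlast]
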